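-- pv_equiv track=rewrite | github.com/gsaukov/python-machine | core/interviewquest/non_repeating.py | non_repeating2
-- ===== SOURCE A (Python) =====
-- def non_repeating2(s):
--     s = s.replace(' ', '').lower()
--
--     char_count = {}
--     for c in s:
--         if c in char_count:
--             char_count[c] += 1
--         else:
--             char_count[c] = 1
--
--     all_uniques = []
--     y = sorted(char_count.items(), key=lambda x: x[1])
--
--     for item in y:
--         if item[1] == y[0][1]:
--             all_uniques.append(item)
--
--     return all_uniques
-- ===== SOURCE B (Python) =====
-- def non_repeating2(s):
--     s = s.replace(' ', '').lower()
--     chars = list(s)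
--
--     seen = []
--     for c in chars:
--         if c not in seen:
--             seen.append(c)
--
--     if not seen:
--         return []
--     m = min(chars.count(c) for c in seen)
--     return [(c, m) for c in seen if chars.count(c) == m]
-- ===== Notes on version B (the rewrite author's own statement) =====
-- stated objective: alternative
-- what changed: Drops A's count dictionary and its sort entirely: B keeps only a first-occurrence dedup list of the characters, computes each character's frequency with list.count, takes the minimum, and emits the minimum-frequency characters in first-occurrence order.
import Mathlib
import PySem

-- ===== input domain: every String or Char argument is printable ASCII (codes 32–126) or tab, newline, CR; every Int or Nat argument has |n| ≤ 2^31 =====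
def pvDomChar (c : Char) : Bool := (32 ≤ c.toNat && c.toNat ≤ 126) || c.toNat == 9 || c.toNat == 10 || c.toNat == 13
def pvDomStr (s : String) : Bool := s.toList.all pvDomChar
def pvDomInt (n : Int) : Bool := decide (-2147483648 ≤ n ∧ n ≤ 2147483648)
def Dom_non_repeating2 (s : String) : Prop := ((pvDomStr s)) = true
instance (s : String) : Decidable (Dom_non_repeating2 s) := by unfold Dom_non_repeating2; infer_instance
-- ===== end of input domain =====

-- B (alternative): no count dictionary and no sort — a first-occurrence dedup list of the
-- characters, per-character frequencies via list.count, min, and one filter.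

-- ===== PORT A =====
def non_repeating2 (s : String) : List (String × Int) :=
  -- s = s.replace(' ', '').lower()
  let cs : List Char := PySem.Chars.lower (PySem.Chars.replace s.toList [' '] [])
  -- for c in s: if c in char_count: char_count[c] += 1 else: char_count[c] = 1
  let cc : PySem.Dict String Int := cs.foldl (fun d c =>
    if d.contains (String.singleton c) then
      d.insert (String.singleton c) (d.getD (String.singleton c) 0 + 1)
    else
      d.insert (String.singleton c) 1) PySem.Dict.empty
  -- y = sorted(char_count.items(), key=lambda x: x[1])
  let y := PySem.List.sorted cc.items (fun x => x.2) false
  -- for item in y: if item[1] == y[0][1]: all_uniques.append(item)   (y[0] only read when y ≠ [])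
  match y with
  | [] => []
  | h :: t => (h :: t).foldl (fun acc item => if item.2 = h.2 then acc ++ [item] else acc) []

-- ===== PORT B =====
def non_repeating2_alt (s : String) : List (String × Int) :=
  let cs : List Char := PySem.Chars.lower (PySem.Chars.replace s.toList [' '] [])
  -- for c in chars: if c not in seen: seen.append(c)
  let seen : List Char := cs.foldl (fun acc c => if acc.contains c then acc else acc ++ [c]) []
  -- if not seen: return [] ; m = min(chars.count(c) for c in seen) ; filter seen, pair with m
  match PySem.List.min? (seen.map (fun c => (cs.count c : Int))) (fun v => v) with
  | none => []
  | some m => (seen.filter (fun c => (cs.count c : Int) == m)).map (fun c => (String.singleton c, m))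

-- ===== PRECONDITION & SPEC =====
def Spec_non_repeating2 (s : String) (out : List (String × Int)) : Prop := out = non_repeating2_alt s
instance (s : String) (out : List (String × Int)) : Decidable (Spec_non_repeating2 s out) := by unfold Spec_non_repeating2; infer_instance

-- ===== CLAIM (what is proved, stated in full; the proofs are below) =====
def Claim_equal_non_repeating2 : Prop := ∀ (s : String), Dom_non_repeating2 s → Spec_non_repeating2 s (non_repeating2 s)

-- ===== LEMMAS AND PROOFS =====

-- A's two counting branches are one insert: when the key is absent, getD gives the default 0.
theorem pv_step_eq (d : PySem.Dict String Int) (c : Char) :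
    (if d.contains (String.singleton c) then
      d.insert (String.singleton c) (d.getD (String.singleton c) 0 + 1)
    else
      d.insert (String.singleton c) 1)
    = d.insert (String.singleton c) (d.getD (String.singleton c) 0 + 1) := by
  by_cases h : d.contains (String.singleton c) = true
  · simp [h]
  · simp only [Bool.not_eq_true] at h
    simp [h, PySem.Dict.getD_of_not_contains _ _ h]

-- ordered dedup commutes with an injective map
theorem pv_ofList_map (f : Char → String) (hf : Function.Injective f) (xs : List Char) :
    PySem.Set.ofList (xs.map f) = (PySem.Set.ofList xs).map f := by
  induction xs using List.reverseRecOn with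
  | nil => rfl
  | append_singleton l x ih =>
    rw [List.map_append, List.map_singleton, PySem.Set.ofList_append_singleton,
      PySem.Set.ofList_append_singleton, ih, PySem.Set.add_eq_ite, PySem.Set.add_eq_ite]
    by_cases hx : x ∈ PySem.Set.ofList l
    · simp [hx, List.mem_map_of_mem]
    · have : f x ∉ (PySem.Set.ofList l).map f := by
        intro hm
        rcases List.mem_map.mp hm with ⟨y, hy, hxy⟩
        exact hx (hf hxy ▸ hy)
      simp [hx, this]

-- inserting an element that fails the filter does not change the filtered list
theorem pv_filter_insertBy_of_neg {α : Type} (P : α → Bool) (bef : α → α → Bool)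
    (x : α) (ys : List α) (hx : P x = false) :
    (PySem.List.insertBy bef x ys).filter P = ys.filter P := by
  induction ys with
  | nil => simp [PySem.List.insertBy, hx]
  | cons y t ih =>
    simp only [PySem.List.insertBy]
    split
    · simp [hx]
    · cases hy : P y <;> simp [hy, ih]

-- inserting a minimal-key element into a key-sorted list of ≥-m keys puts it after all kept elements
theorem pv_filter_insertBy_of_min (m : Int) (x : String × Int) (ys : List (String × Int))
    (hx : x.2 = m)
    (hpair : ys.Pairwise (fun a b => a.2 ≤ b.2))
    (hmin : ∀ y ∈ ys, m ≤ y.2) :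
    (PySem.List.insertBy (fun a b => decide (a.2 < b.2)) x ys).filter (fun p => p.2 == m)
      = ys.filter (fun p => p.2 == m) ++ [x] := by
  induction ys with
  | nil => simp [PySem.List.insertBy, hx]
  | cons y t ih =>
    simp only [PySem.List.insertBy]
    rcases List.pairwise_cons.mp hpair with ⟨hyt, hpt⟩
    split
    · rename_i hlt
      simp only [decide_eq_true_eq] at hlt
      have hy : (y.2 == m) = false := by simp; omega
      have ht : t.filter (fun p => p.2 == m) = [] := by
        rw [List.filter_eq_nil_iff]
        intro a ha
        have := hyt a ha
        simp; omega
      simp [hx, hy, ht]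
    · have hrec := ih hpt (fun y hy => hmin y (List.mem_cons_of_mem _ hy))
      cases hy : (y.2 == m) <;> simp [hy, hrec]

-- filtering the minimal key out of the stable sort equals filtering the original list
theorem pv_filter_min_sorted (l : List (String × Int)) (m : Int)
    (hmin : ∀ y ∈ l, m ≤ y.2) :
    (PySem.List.sorted l (fun x => x.2) false).filter (fun p => p.2 == m)
      = l.filter (fun p => p.2 == m) := by
  induction l using List.reverseRecOn with
  | nil =>
    rw [(PySem.List.sorted_eq_nil_iff _ _ _).mpr rfl]
  | append_singleton l x ih =>
    have hstep : PySem.List.sorted (l ++ [x]) (fun p => p.2) false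
        = PySem.List.insertBy (fun a b => decide (a.2 < b.2)) x
            (PySem.List.sorted l (fun p => p.2) false) := by
      rw [PySem.List.sorted_eq_foldl_insertBy, PySem.List.sorted_eq_foldl_insertBy,
        List.foldl_append]
      rfl
    have hmin' : ∀ y ∈ l, m ≤ y.2 := fun y hy => hmin y (List.mem_append_left _ hy)
    have ih' := ih hmin'
    by_cases hx : x.2 = m
    · rw [hstep, pv_filter_insertBy_of_min m x _ hx
        (PySem.List.sorted_pairwise l (fun p => p.2))
        (fun y hy => hmin' y ((PySem.List.mem_sorted l _ false y).mp hy)), ih',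
        List.filter_append]
      simp [hx]
    · have hxb : (x.2 == m) = false := by simpa using hx
      rw [hstep, pv_filter_insertBy_of_neg (fun p : String × Int => p.2 == m)
        (fun a b => decide (a.2 < b.2)) x (PySem.List.sorted l (fun p => p.2) false) hxb,
        ih', List.filter_append]
      simp [hxb]

-- A's sort-head-then-rescan equals min-then-filter, for any item list
theorem pv_core (l : List (String × Int)) :
    (match PySem.List.sorted l (fun x => x.2) false with
     | [] => ([] : List (String × Int))
     | h :: t => (h :: t).foldl (fun acc (item : String × Int) => if item.2 = h.2 then acc ++ [item] else acc) [])
    = match PySem.List.min? (l.map Prod.snd) (fun v => v) with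
      | none => []
      | some m => l.filter (fun item => item.2 == m) := by
  cases hs : PySem.List.sorted l (fun x => x.2) false with
  | nil =>
    have hl : l = [] := (PySem.List.sorted_eq_nil_iff l _ false).mp hs
    subst hl
    simp [PySem.List.min?]
  | cons h t =>
    have hl : l ≠ [] := by
      intro h0; subst h0
      rw [(PySem.List.sorted_eq_nil_iff _ _ _).mpr rfl] at hs
      cases hs
    cases hm : PySem.List.min? (l.map Prod.snd) (fun v => v) with
    | none =>
      exact absurd (List.map_eq_nil_iff.mp ((PySem.List.min?_eq_none_iff _ _).mp hm)) hl
    | some m =>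
      have h1 : ∀ v ∈ l.map Prod.snd, m ≤ v := PySem.List.min?_isMin hm
      have h2 : ∀ y ∈ l, h.2 ≤ y.2 := PySem.List.key_head_sorted_le l _ hs
      have hhl : h ∈ l := (PySem.List.mem_sorted l _ false h).mp (hs ▸ List.mem_cons_self)
      rcases List.mem_map.mp (PySem.List.min?_mem hm) with ⟨p, hpl, hpm⟩
      have heq : m = h.2 := le_antisymm
        (h1 h.2 (List.mem_map.mpr ⟨h, hhl, rfl⟩)) (hpm ▸ h2 p hpl)
      have hfold := PySem.List.foldl_append_ite_eq_filter (fun p : String × Int => p.2 = h.2) (h :: t) []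
      dsimp only
      rw [hfold, List.nil_append, ← hs, heq]
      exact pv_filter_min_sorted l h.2 (heq ▸ fun y hy => h1 y.2 (List.mem_map.mpr ⟨y, hy, rfl⟩))

-- filtering the pair list by its count component is mapping the filtered character list
theorem pv_filter_map (seen : List Char) (cnt : Char → Int) (m : Int) :
    (seen.map (fun c => (String.singleton c, cnt c))).filter (fun p => p.2 == m)
      = (seen.filter (fun c => cnt c == m)).map (fun c => (String.singleton c, m)) := by
  induction seen with
  | nil => rfl
  | cons c t ih =>
    simp only [List.map_cons, List.filter_cons]
    cases hc : (cnt c == m) with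
    | false => simpa [hc] using ih
    | true =>
      have : cnt c = m := by simpa using hc
      simp [this, ih]

-- ===== VERDICT (by name: the statement is the Claim_ definition above) =====
theorem non_repeating2_spec : Claim_equal_non_repeating2 := by
  intro s _
  unfold Spec_non_repeating2 non_repeating2 non_repeating2_alt
  set cs : List Char := PySem.Chars.lower (PySem.Chars.replace s.toList [' '] []) with hcs
  -- A's counting loop is the Counter of the singletonised characters
  have hsteps : cs.foldl (fun (d : PySem.Dict String Int) (c : Char) =>
      if d.contains (String.singleton c) then
        d.insert (String.singleton c) (d.getD (String.singleton c) 0 + 1)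
      else
        d.insert (String.singleton c) 1) PySem.Dict.empty
      = PySem.Dict.counter (cs.map String.singleton) := by
    rw [← PySem.Dict.foldl_insert_getD_add_one_eq_counter, List.foldl_map]
    congr 1
    funext d c
    exact pv_step_eq d c
  -- B's dedup loop is ordered dedup
  have hseen : cs.foldl (fun acc c => if acc.contains c then acc else acc ++ [c]) ([] : List Char)
      = PySem.Set.ofList cs := by
    rw [← PySem.Set.update_empty]
    rfl
  have hinj : Function.Injective String.singleton := by
    intro a b hab
    have : (String.singleton a).toList = (String.singleton b).toList := by rw [hab]
    simpa [String.singleton] using this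
  -- the Counter's items are B's dedup list, paired with B's counts
  have hitems : (PySem.Dict.counter (cs.map String.singleton)).items
      = (PySem.Set.ofList cs).map (fun c => (String.singleton c, (cs.count c : Int))) := by
    rw [PySem.Dict.items_counter, pv_ofList_map _ hinj, List.map_map]
    congr 1
    funext c
    simp [List.count_map_of_injective _ _ hinj]
  simp only [hsteps, hseen, hitems]
  rw [pv_core]
  rw [List.map_map]
  have hmaps : ((fun p : String × Int => p.2) ∘ fun c => (String.singleton c, (cs.count c : Int)))
      = fun c => (cs.count c : Int) := rfl
  rw [hmaps]
  cases hm : PySem.List.min? ((PySem.Set.ofList cs).map (fun c => (cs.count c : Int))) (fun v => v) with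
  | none => rfl
  | some m => exact pv_filter_map (PySem.Set.ofList cs) (fun c => (cs.count c : Int)) m
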